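-- pv_equiv track=rewrite | github.com/blixuk/zenshell | src/core/engine.py | _build_pipeline
-- ===== SOURCE A (Python) =====
-- def _build_pipeline(args: list) -> list:
--     pipeline    =   []
--     pipe        =   []
--
--     for arg in args:
--         if arg != "|":
--             pipe.append(arg)
--         else:
--             pipeline.append(pipe)
--             pipe = []
--
--     pipeline.append(pipe)
--
--     return pipeline
-- ===== SOURCE B (Python) =====
-- def _build_pipeline(args: list) -> list:
--     seps = [i for i, a in enumerate(args) if a == "|"]
--     out = []
--     prev = 0
--     for i in seps:
--         out.append(args[prev:i])
--         prev = i + 1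
--     out.append(args[prev:])
--     return out
-- ===== Notes on version B (the rewrite author's own statement) =====
-- stated objective: alternative
-- what changed: Replaces the accumulate-and-flush loop with a two-phase index-table-then-slice shape: first collect the indices of '|' separators, then emit one slice of args per boundary pair.
import Mathlib
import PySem

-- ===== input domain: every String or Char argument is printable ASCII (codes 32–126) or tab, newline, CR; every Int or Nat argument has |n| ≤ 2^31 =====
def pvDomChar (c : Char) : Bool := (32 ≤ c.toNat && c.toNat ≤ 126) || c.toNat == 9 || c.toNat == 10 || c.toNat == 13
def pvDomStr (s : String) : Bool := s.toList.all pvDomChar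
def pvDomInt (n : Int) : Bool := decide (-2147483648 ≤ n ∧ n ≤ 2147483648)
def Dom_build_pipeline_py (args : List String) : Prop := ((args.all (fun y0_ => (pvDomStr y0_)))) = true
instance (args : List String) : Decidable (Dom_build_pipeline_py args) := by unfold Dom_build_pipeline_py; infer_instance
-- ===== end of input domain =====

-- B replaces A's accumulate-and-flush loop by a two-phase shape (collect the '|' indices, then emit one slice per boundary pair); alternative decomposition, same cost.

-- ===== PORT A =====
def build_pipeline_py (args : List String) : List (List String) :=
  let st := args.foldl
    (fun (st : List (List String) × List String) arg =>
      if arg ≠ "|" then (st.1, st.2 ++ [arg]) else (st.1 ++ [st.2], []))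
    ([], [])
  st.1 ++ [st.2]

-- ===== PORT B =====
def build_pipeline_py_alt (args : List String) : List (List String) :=
  let seps := ((PySem.List.enumerate args).filter (fun p => p.2 == "|")).map Prod.fst
  let st := seps.foldl
    (fun (st : List (List String) × Int) i =>
      (st.1 ++ [PySem.List.slice args (some st.2) (some i)], i + 1))
    ([], 0)
  st.1 ++ [PySem.List.slice args (some st.2) none]

-- ===== PRECONDITION & SPEC =====
def Spec_build_pipeline_py (args : List String) (out : List (List String)) : Prop := out = build_pipeline_py_alt args
instance (args : List String) (out : List (List String)) : Decidable (Spec_build_pipeline_py args out) := by unfold Spec_build_pipeline_py; infer_instance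

-- ===== CLAIM (what is proved, stated in full; the proofs are below) =====
def Claim_equal_build_pipeline_py : Prop := ∀ (args : List String), Dom_build_pipeline_py args → Spec_build_pipeline_py args (build_pipeline_py args)

-- ===== LEMMAS AND PROOFS =====

-- Reference form of the split: the list of segments between '|' separators.
def segs : List String → List (List String)
  | [] => [[]]
  | a :: r =>
    if a = "|" then [] :: segs r
    else
      match segs r with
      | [] => [[a]]
      | x :: xs => (a :: x) :: xs

theorem segs_ne_nil (args : List String) : segs args ≠ [] := by
  cases args with
  | nil => simp [segs]
  | cons a r =>
    simp only [segs]
    split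
    · simp
    · cases h : segs r <;> simp

-- A's loop step
def stepA (st : List (List String) × List String) (arg : String) : List (List String) × List String :=
  if arg ≠ "|" then (st.1, st.2 ++ [arg]) else (st.1 ++ [st.2], [])

-- prepend p to the first segment
def consFirst (p : List String) : List (List String) → List (List String)
  | [] => [p]
  | x :: xs => (p ++ x) :: xs

theorem foldA_eq (args : List String) : ∀ (pl : List (List String)) (p : List String),
    (args.foldl stepA (pl, p)).1 ++ [(args.foldl stepA (pl, p)).2] = pl ++ consFirst p (segs args) := by
  induction args with
  | nil => intro pl p; simp [consFirst, segs]
  | cons a r ih =>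
    intro pl p
    by_cases h : a = "|"
    · rw [List.foldl_cons, show stepA (pl, p) a = (pl ++ [p], []) by simp [stepA, h], ih]
      cases hs : segs r with
      | nil => exact absurd hs (segs_ne_nil r)
      | cons x xs => simp [segs, h, consFirst, hs]
    · rw [List.foldl_cons, show stepA (pl, p) a = (pl, p ++ [a]) by simp [stepA, h], ih]
      cases hs : segs r with
      | nil => exact absurd hs (segs_ne_nil r)
      | cons x xs => simp [segs, h, consFirst, hs]

-- B's loop step and the B loop generalized over the index list and the previous boundary
def stepB (args : List String) (st : List (List String) × Int) (i : Int) : List (List String) × Int :=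
  (st.1 ++ [PySem.List.slice args (some st.2) (some i)], i + 1)

def hB (args : List String) (is : List Int) (prev : Int) : List (List String) :=
  let st := is.foldl (stepB args) ([], prev)
  st.1 ++ [PySem.List.slice args (some st.2) none]

theorem foldB_out (args : List String) (is : List Int) :
    ∀ (out : List (List String)) (prev : Int),
    is.foldl (stepB args) (out, prev)
      = (out ++ (is.foldl (stepB args) ([], prev)).1, (is.foldl (stepB args) ([], prev)).2) := by
  induction is with
  | nil => intro out prev; simp
  | cons i is ih =>
    intro out prev
    simp only [List.foldl_cons, stepB]
    rw [ih (out ++ [PySem.List.slice args (some prev) (some i)]) (i + 1),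
        ih ([] ++ [PySem.List.slice args (some prev) (some i)]) (i + 1)]
    simp

theorem hB_nil (args : List String) (prev : Int) :
    hB args [] prev = [PySem.List.slice args (some prev) none] := by
  simp [hB]

theorem hB_cons (args : List String) (i : Int) (is : List Int) (prev : Int) :
    hB args (i :: is) prev = PySem.List.slice args (some prev) (some i) :: hB args is (i + 1) := by
  simp only [hB, List.foldl_cons, stepB]
  rw [foldB_out args is ([] ++ [PySem.List.slice args (some prev) (some i)]) (i + 1)]
  simp

-- separator index list, generalized starting offset
def sepsFrom (args : List String) (s : Int) : List Int :=
  ((PySem.List.enumerate args s).filter (fun p => p.2 == "|")).map Prod.fst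

theorem sepsFrom_cons (a : String) (r : List String) (s : Int) :
    sepsFrom (a :: r) s = if a = "|" then s :: sepsFrom r (s + 1) else sepsFrom r (s + 1) := by
  by_cases h : a = "|" <;> simp [sepsFrom, PySem.List.enumerate_cons, h]

theorem enumerate_shift {α : Type} (xs : List α) : ∀ (s : Int),
    PySem.List.enumerate xs (s + 1) = (PySem.List.enumerate xs s).map (fun p => (p.1 + 1, p.2)) := by
  induction xs with
  | nil => intro s; simp [PySem.List.enumerate_nil]
  | cons x xs ih =>
    intro s
    rw [PySem.List.enumerate_cons, PySem.List.enumerate_cons, ih (s + 1)]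
    simp

theorem sepsFrom_shift (r : List String) (s : Int) :
    sepsFrom r (s + 1) = (sepsFrom r s).map (· + 1) := by
  simp only [sepsFrom, enumerate_shift, List.filter_map, List.map_map]
  rfl

theorem sepsFrom_nonneg (r : List String) : ∀ (s : Int), 0 ≤ s → ∀ i ∈ sepsFrom r s, 0 ≤ i := by
  induction r with
  | nil => intro s _ i hi; simp [sepsFrom, PySem.List.enumerate_nil] at hi
  | cons a r ih =>
    intro s hs i hi
    rw [sepsFrom_cons] at hi
    by_cases h : a = "|"
    · rw [if_pos h] at hi
      rcases List.mem_cons.mp hi with rfl | hmem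
      · exact hs
      · exact ih (s + 1) (by omega) i hmem
    · rw [if_neg h] at hi
      exact ih (s + 1) (by omega) i hi

theorem slice_cons_shift (a : String) (args : List String) (p i : Int) (hp : 0 ≤ p) (hi : 0 ≤ i) :
    PySem.List.slice (a :: args) (some (p + 1)) (some (i + 1)) = PySem.List.slice args (some p) (some i) := by
  rw [PySem.List.slice_toNat _ (by omega) (by omega), PySem.List.slice_toNat _ hp hi]
  have h1 : (p + 1).toNat = p.toNat + 1 := by omega
  have h2 : (i + 1).toNat - (p + 1).toNat = i.toNat - p.toNat := by omega
  rw [h2, h1, List.drop_succ_cons]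

theorem slice_cons_shift_none (a : String) (args : List String) (p : Int) (hp : 0 ≤ p) :
    PySem.List.slice (a :: args) (some (p + 1)) none = PySem.List.slice args (some p) none := by
  rw [PySem.List.slice_from _ (by omega), PySem.List.slice_from _ hp]
  have h1 : (p + 1).toNat = p.toNat + 1 := by omega
  rw [h1, List.drop_succ_cons]

theorem hB_shift (a : String) (args : List String) (is : List Int) :
    ∀ (prev : Int), 0 ≤ prev → (∀ i ∈ is, 0 ≤ i) →
    hB (a :: args) (is.map (· + 1)) (prev + 1) = hB args is prev := by
  induction is with
  | nil =>
    intro prev hp _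
    rw [List.map_nil, hB_nil, hB_nil, slice_cons_shift_none a args prev hp]
  | cons i is ih =>
    intro prev hp hnn
    have hi : 0 ≤ i := hnn i List.mem_cons_self
    rw [List.map_cons, hB_cons, hB_cons, slice_cons_shift a args prev i hp hi,
        ih (i + 1) (by omega) (fun j hj => hnn j (List.mem_cons_of_mem _ hj))]

theorem hB_segs (args : List String) : hB args (sepsFrom args 0) 0 = segs args := by
  induction args with
  | nil =>
    rw [show sepsFrom [] 0 = [] by simp [sepsFrom, PySem.List.enumerate_nil], hB_nil]
    rw [PySem.List.slice_from _ le_rfl]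
    simp [segs]
  | cons a r ih =>
    rw [sepsFrom_cons]
    have hshift : sepsFrom r (0 + 1) = (sepsFrom r 0).map (· + 1) := sepsFrom_shift r 0
    have hnn : ∀ i ∈ sepsFrom r 0, 0 ≤ i := sepsFrom_nonneg r 0 le_rfl
    by_cases h : a = "|"
    · rw [if_pos h, hshift, hB_cons]
      have hsl : PySem.List.slice (a :: r) (some (0 : Int)) (some (0 : Int)) = [] := by
        rw [PySem.List.slice_toNat _ le_rfl le_rfl]; simp
      rw [hsl, show (0 : Int) + 1 = 0 + 1 from rfl,
          hB_shift a r (sepsFrom r 0) 0 le_rfl hnn, ih]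
      simp [segs, h]
    · rw [if_neg h, hshift]
      cases hs : sepsFrom r 0 with
      | nil =>
        rw [List.map_nil, hB_nil, PySem.List.slice_from _ le_rfl]
        rw [hs, hB_nil, PySem.List.slice_from _ le_rfl] at ih
        simp only [Int.toNat_zero, List.drop_zero] at ih ⊢
        simp [segs, h, ← ih]
      | cons i is' =>
        have hi : 0 ≤ i := hnn i (hs ▸ List.mem_cons_self)
        have hnn' : ∀ j ∈ is', 0 ≤ j := fun j hj => hnn j (hs ▸ List.mem_cons_of_mem _ hj)
        rw [List.map_cons, hB_cons]
        have hsl : PySem.List.slice (a :: r) (some (0 : Int)) (some (i + 1))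
            = a :: PySem.List.slice r (some (0 : Int)) (some i) := by
          rw [PySem.List.slice_toNat _ le_rfl (by omega), PySem.List.slice_toNat _ le_rfl hi]
          have h1 : (i + 1).toNat = i.toNat + 1 := by omega
          simp [h1]
        rw [hsl, hB_shift a r is' (i + 1) (by omega) hnn']
        rw [hs, hB_cons] at ih
        simp [segs, h, ← ih]

theorem altB_eq (args : List String) : build_pipeline_py_alt args = segs args := by
  have : build_pipeline_py_alt args = hB args (sepsFrom args 0) 0 := rfl
  rw [this, hB_segs]

theorem portA_eq (args : List String) : build_pipeline_py args = segs args := by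
  have h0 : build_pipeline_py args
      = (args.foldl stepA ([], [])).1 ++ [(args.foldl stepA ([], [])).2] := rfl
  rw [h0, foldA_eq args [] []]
  cases hs : segs args with
  | nil => exact absurd hs (segs_ne_nil args)
  | cons x xs => simp [consFirst]

-- ===== VERDICT (by name: the statement is the Claim_ definition above) =====
theorem build_pipeline_py_spec : Claim_equal_build_pipeline_py := by
  intro args _
  unfold Spec_build_pipeline_py
  rw [portA_eq, altB_eq]
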